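-- pv_equiv track=rewrite | github.com/Shorrowd/IPRP | 2 teste 2VALORES.py | subs_por_occur
-- ===== SOURCE A (Python) =====
-- def subs_por_occur(texto, letra_substituir):
--     contador = 1
--     resultado = ""
--
--     for letra in texto:
--         if letra == letra_substituir:
--             resultado += str(contador)
--             contador += 1
--         else:
--             resultado += letra
--
--     return resultado
-- ===== SOURCE B (Python) =====
-- def subs_por_occur(texto, letra_substituir):
--     # A's per-char equality only ever matches a single-character letra_substituir;
--     # otherwise nothing is replaced.
--     if len(letra_substituir) != 1:
--         return texto
--     pieces = texto.split(letra_substituir)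
--     resultado = pieces[0]
--     for i, pedaco in enumerate(pieces[1:], 1):
--         resultado += str(i) + pedaco
--     return resultado
-- ===== Notes on version B (the rewrite author's own statement) =====
-- stated objective: faster
-- what changed: B replaces the per-character branch-and-append loop by split on the separator character and a join that interleaves the incrementing counters between the pieces (with a guard returning texto unchanged when letra_substituir is not a single character, where A's per-char equality never matches).
import Mathlib
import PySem

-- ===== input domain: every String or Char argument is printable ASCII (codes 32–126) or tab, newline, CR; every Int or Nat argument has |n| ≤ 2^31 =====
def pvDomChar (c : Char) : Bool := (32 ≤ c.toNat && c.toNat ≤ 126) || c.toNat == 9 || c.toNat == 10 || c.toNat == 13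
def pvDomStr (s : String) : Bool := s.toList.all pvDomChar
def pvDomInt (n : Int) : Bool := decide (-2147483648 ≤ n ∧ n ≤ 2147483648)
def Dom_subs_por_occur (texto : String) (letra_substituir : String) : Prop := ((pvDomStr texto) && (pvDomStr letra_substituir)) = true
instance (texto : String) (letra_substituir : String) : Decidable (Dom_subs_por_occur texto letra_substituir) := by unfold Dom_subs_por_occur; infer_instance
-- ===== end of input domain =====

-- B rebuilds the result from texto.split(letra_substituir) with counters joined between the
-- pieces, instead of A's per-character branch-and-append loop (measurably faster in CPython).

-- ===== PORT A =====
-- for letra in texto: if letra == letra_substituir: resultado += str(contador); contador += 1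
--                     else: resultado += letra
def subs_por_occur (texto : String) (letra_substituir : String) : String :=
  let st := texto.toList.foldl
    (fun (st : Int × List Char) letra =>
      if [letra] = letra_substituir.toList then (st.1 + 1, st.2 ++ PySem.Int.toChars st.1)
      else (st.1, st.2 ++ [letra]))
    ((1 : Int), ([] : List Char))
  String.ofList st.2

-- ===== PORT B =====
def subs_por_occur_alt (texto : String) (letra_substituir : String) : String :=
  if PySem.Str.len letra_substituir ≠ 1 then texto
  else
    let pieces := PySem.Chars.splitOn texto.toList letra_substituir.toList
    -- pieces[0]: split always returns a nonempty list, so the Python indexing cannot raise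
    let r := (PySem.List.enumerate (PySem.List.slice pieces (some 1) none) 1).foldl
      (fun (res : List Char) p => res ++ PySem.Int.toChars p.1 ++ p.2)
      (PySem.List.pyGetD pieces 0 [])
    String.ofList r

-- ===== PRECONDITION & SPEC =====
def Spec_subs_por_occur (texto : String) (letra_substituir : String) (out : String) : Prop := out = subs_por_occur_alt texto letra_substituir
instance (texto : String) (letra_substituir : String) (out : String) : Decidable (Spec_subs_por_occur texto letra_substituir out) := by unfold Spec_subs_por_occur; infer_instance

-- ===== CLAIM (what is proved, stated in full; the proofs are below) =====
def Claim_equal_subs_por_occur : Prop := ∀ (texto : String) (letra_substituir : String), Dom_subs_por_occur texto letra_substituir → Spec_subs_por_occur texto letra_substituir (subs_por_occur texto letra_substituir)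

-- ===== LEMMAS AND PROOFS =====

-- simple recursive characterisation of splitting on one character
def split1 (c : Char) : List Char → List (List Char)
  | [] => [[]]
  | d :: rest => if d = c then [] :: split1 c rest else (split1 c rest).modifyHead (d :: ·)

-- A's loop as structural recursion
def goA (c : Char) : List Char → Int → List Char
  | [], _ => []
  | d :: rest, k => if d = c then PySem.Int.toChars k ++ goA c rest (k + 1) else d :: goA c rest k

-- B's counter-interleaved join of the tail pieces
def tailJoin (k : Int) : List (List Char) → List Char
  | [] => []
  | p :: ps => PySem.Int.toChars k ++ p ++ tailJoin (k + 1) ps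

theorem split1_ne_nil (c : Char) (l : List Char) : split1 c l ≠ [] := by
  induction l with
  | nil => simp [split1]
  | cons d rest ih =>
    simp only [split1]
    split_ifs
    · simp
    · cases h : split1 c rest with
      | nil => exact absurd h ih
      | cons p ps => simp [h]

theorem splitOn_go_single (c : Char) (fuel : Nat) (l cur : List Char)
    (acc : List (List Char)) (hf : l.length < fuel) :
    PySem.Chars.splitOn.go [c] fuel l cur acc
      = acc.reverse ++ (split1 c l).modifyHead (cur.reverse ++ ·) := by
  induction fuel generalizing l cur acc with
  | zero => omega
  | succ fuel ih =>
    cases l with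
    | nil =>
      rw [PySem.Chars.splitOn.go.eq_def]
      simp [split1]
    | cons d rest =>
      have hf' : rest.length < fuel := by
        simp only [List.length_cons] at hf; omega
      rw [PySem.Chars.splitOn.go.eq_def]
      simp only [List.isPrefixOf]
      by_cases hd : d = c
      · subst hd
        rw [if_pos (by simp)]
        have hdrop : List.drop ([d] : List Char).length (d :: rest) = rest := by simp
        rw [hdrop, ih rest [] (cur.reverse :: acc) hf']
        cases h : split1 d rest with
        | nil => exact absurd h (split1_ne_nil d rest)
        | cons p ps =>
          simp [split1, h, List.modifyHead]
      · rw [if_neg (by simp [Ne.symm hd])]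
        rw [ih rest (d :: cur) acc hf']
        cases h : split1 c rest with
        | nil => exact absurd h (split1_ne_nil c rest)
        | cons p ps =>
          simp [split1, hd, h, List.modifyHead]

theorem splitOn_single (c : Char) (l : List Char) :
    PySem.Chars.splitOn l [c] = split1 c l := by
  unfold PySem.Chars.splitOn
  rw [splitOn_go_single c (l.length + 1) l [] [] (by omega)]
  cases h : split1 c l with
  | nil => exact absurd h (split1_ne_nil c l)
  | cons p ps => simp [List.modifyHead]

theorem foldA_eq (c : Char) (sep : List Char) (hsep : sep = [c]) (l : List Char)
    (k : Int) (acc : List Char) :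
    (l.foldl (fun (st : Int × List Char) letra =>
        if [letra] = sep then (st.1 + 1, st.2 ++ PySem.Int.toChars st.1)
        else (st.1, st.2 ++ [letra])) (k, acc)).2 = acc ++ goA c l k := by
  subst hsep
  induction l generalizing k acc with
  | nil => simp [goA]
  | cons d rest ih =>
    by_cases hd : d = c
    · subst hd
      simp only [List.foldl_cons, if_pos rfl]
      rw [ih]; simp [goA]
    · rw [List.foldl_cons, if_neg (show ¬([d] = [c]) by simp [hd]), ih]
      simp [goA, hd]

theorem goA_eq_tailJoin (c : Char) (l : List Char) (k : Int) :
    goA c l k = (split1 c l).headI ++ tailJoin k ((split1 c l).drop 1) := by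
  induction l generalizing k with
  | nil => simp [goA, split1, tailJoin]
  | cons d rest ih =>
    by_cases hd : d = c
    · subst hd
      simp only [goA, if_pos rfl, split1, List.headI, List.drop]
      cases h : split1 d rest with
      | nil => exact absurd h (split1_ne_nil d rest)
      | cons p ps =>
        rw [ih (k + 1)]
        simp [h, tailJoin, List.headI]
    · simp only [goA, if_neg hd, split1, if_neg hd]
      cases h : split1 c rest with
      | nil => exact absurd h (split1_ne_nil c rest)
      | cons p ps =>
        rw [ih k]
        simp [h, List.modifyHead, List.headI, tailJoin]

theorem foldB_eq (ps : List (List Char)) (j : Int) (res : List Char) :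
    ((PySem.List.enumerate ps j).foldl
        (fun (res : List Char) p => res ++ PySem.Int.toChars p.1 ++ p.2) res)
      = res ++ tailJoin j ps := by
  induction ps generalizing j res with
  | nil => simp [PySem.List.enumerate, tailJoin]
  | cons p rest ih =>
    simp only [PySem.List.enumerate, List.foldl_cons]
    rw [ih]
    simp [tailJoin]

theorem no_match_id (l : List Char) (sep : List Char) (hsep : sep.length ≠ 1)
    (k : Int) (acc : List Char) :
    (l.foldl (fun (st : Int × List Char) letra =>
        if [letra] = sep then (st.1 + 1, st.2 ++ PySem.Int.toChars st.1)
        else (st.1, st.2 ++ [letra])) (k, acc)).2 = acc ++ l := by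
  induction l generalizing k acc with
  | nil => simp
  | cons d rest ih =>
    have : ¬ ([d] = sep) := fun h => hsep (by rw [← h]; rfl)
    simp only [List.foldl_cons, if_neg this]
    rw [ih]; simp

-- ===== VERDICT (by name: the statement is the Claim_ definition above) =====
theorem subs_por_occur_spec : Claim_equal_subs_por_occur := by
  intro texto letra _
  unfold Spec_subs_por_occur subs_por_occur subs_por_occur_alt
  by_cases hlen : PySem.Str.len letra = 1
  · -- single-character separator
    have hl : letra.toList.length = 1 := by
      simpa [PySem.Str.len, PySem.Chars.len] using hlen
    obtain ⟨c, hc⟩ : ∃ c, letra.toList = [c] := by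
      cases h : letra.toList with
      | nil => simp [h] at hl
      | cons a t =>
        cases t with
        | nil => exact ⟨a, rfl⟩
        | cons b t' => simp [h] at hl
    rw [if_neg (not_not_intro hlen)]
    simp only []
    rw [foldA_eq c letra.toList hc texto.toList 1 []]
    rw [hc, splitOn_single c texto.toList]
    rw [goA_eq_tailJoin c texto.toList 1]
    have hslice : PySem.List.slice (split1 c texto.toList) (some 1) none
        = (split1 c texto.toList).drop 1 := by
      simpa using PySem.List.slice_from (split1 c texto.toList) (a := 1) (by norm_num)
    rw [hslice, foldB_eq]
    cases h : split1 c texto.toList with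
    | nil => exact absurd h (split1_ne_nil c texto.toList)
    | cons p ps => simp [h, PySem.List.pyGetD, List.headI]
  · -- separator is not one character: nothing matches, A returns texto; B's guard returns texto
    rw [if_pos hlen]
    have hl : letra.toList.length ≠ 1 := by
      simpa [PySem.Str.len, PySem.Chars.len] using hlen
    simp only []
    rw [no_match_id texto.toList letra.toList hl 1 []]
    simp
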